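-- pv_equiv track=rewrite | github.com/Nate8888/programming-contest-practice | programming-team/Second Semester/kattisbangerset/a.py | what_reverse
-- ===== SOURCE A (Python) =====
-- def what_reverse(x):
-- 	rev = [0,1,2,-1,-1,5,9,-1,8,6]
-- 	num = 0
-- 	while x > 0:
-- 		ending = x % 10
-- 		if rev[ending] == -1:
-- 			return -1
-- 		num = 10 * num + rev[ending]
-- 		x = x // 10
-- 	return num
-- ===== SOURCE B (Python) =====
-- def what_reverse(x):
--     table = {0: 0, 1: 1, 2: 2, 5: 5, 6: 9, 8: 8, 9: 6}
--     digits = []            # decimal digits of x, least-significant first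
--     while x > 0:
--         digits.append(x % 10)
--         x //= 10
--     if any(d not in table for d in digits):
--         return -1
--     num = 0
--     for d in digits:
--         num = 10 * num + table[d]
--     return num
-- ===== Notes on version B (the rewrite author's own statement) =====
-- stated objective: simpler
-- what changed: A interleaves digit extraction, validity check and accumulation in one arithmetic loop with an early return and a sentinel-valued table; B decomposes into three plain passes: build the digit list, reject via a dict membership check (any), then fold the mapped digits into the result.
import Mathlib
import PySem

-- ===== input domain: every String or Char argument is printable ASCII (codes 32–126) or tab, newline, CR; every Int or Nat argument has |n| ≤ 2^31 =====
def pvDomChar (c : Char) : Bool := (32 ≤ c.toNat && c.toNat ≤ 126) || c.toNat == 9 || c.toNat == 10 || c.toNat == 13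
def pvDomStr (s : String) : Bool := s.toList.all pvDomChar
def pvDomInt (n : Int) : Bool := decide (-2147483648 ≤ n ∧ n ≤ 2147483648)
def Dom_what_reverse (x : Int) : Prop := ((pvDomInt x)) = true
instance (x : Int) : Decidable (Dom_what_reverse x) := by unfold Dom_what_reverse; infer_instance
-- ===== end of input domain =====

-- B replaces A's single interleaved digit loop (early return, sentinel-valued table) by three
-- plain passes — digit list, dict membership check, fold — for a simpler decomposition.


-- ===== PORT A =====
-- rev = [0,1,2,-1,-1,5,9,-1,8,6]
def revTableA : List Int := [0, 1, 2, -1, -1, 5, 9, -1, 8, 6]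

-- the while loop of A, with accumulator num
def whatRevLoopA (x : Int) (num : Int) : Int :=
  if x > 0 then
    let ending := PySem.Int.mod x 10
    let r := PySem.List.pyGetD revTableA ending 0  -- rev[ending]; ending ∈ [0,9], never raises
    if r = -1 then -1
    else whatRevLoopA (PySem.Int.floordiv x 10) (10 * num + r)
  else num
  termination_by x.toNat
  decreasing_by
    rw [PySem.Int.floordiv_eq_ediv_of_pos (by omega : (0:Int) < 10)]
    omega

def what_reverse (x : Int) : Int := whatRevLoopA x 0

-- ===== PORT B =====
-- table = {0:0, 1:1, 2:2, 5:5, 6:9, 8:8, 9:6}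
def tableB : PySem.Dict Int Int :=
  PySem.Dict.ofList [(0, 0), (1, 1), (2, 2), (5, 5), (6, 9), (8, 8), (9, 6)]

-- pass 1: digits of x, least-significant first (B's while loop appending x % 10)
def digitsB (x : Int) : List Int :=
  if x > 0 then
    PySem.Int.mod x 10 :: digitsB (PySem.Int.floordiv x 10)
  else []
  termination_by x.toNat
  decreasing_by
    rw [PySem.Int.floordiv_eq_ediv_of_pos (by omega : (0:Int) < 10)]
    omega

def what_reverse_alt (x : Int) : Int :=
  let digits := digitsB x
  -- pass 2: if any(d not in table for d in digits): return -1
  if digits.any (fun d => (PySem.Dict.get? tableB d).isNone) then -1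
  -- pass 3: for d in digits: num = 10 * num + table[d]
  else digits.foldl (fun num d => 10 * num + PySem.Dict.getD tableB d 0) 0

-- ===== PRECONDITION & SPEC =====
def Spec_what_reverse (x : Int) (out : Int) : Prop := out = what_reverse_alt x
instance (x : Int) (out : Int) : Decidable (Spec_what_reverse x out) := by unfold Spec_what_reverse; infer_instance

-- ===== CLAIM (what is proved, stated in full; the proofs are below) =====
def Claim_equal_what_reverse : Prop := ∀ (x : Int), Dom_what_reverse x → Spec_what_reverse x (what_reverse x)

-- ===== LEMMAS AND PROOFS =====

-- For a digit 0 ≤ e < 10, B's dict misses exactly where A's table holds -1,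
-- and agrees with A's table where it hits.
theorem lookup_spec (e : Int) (h0 : 0 ≤ e) (h9 : e < 10) :
    ((PySem.Dict.get? tableB e).isNone = decide (PySem.List.pyGetD revTableA e 0 = -1)) ∧
    (PySem.Dict.getD tableB e 0 =
      if PySem.List.pyGetD revTableA e 0 = -1 then 0 else PySem.List.pyGetD revTableA e 0) := by
  have h : e = 0 ∨ e = 1 ∨ e = 2 ∨ e = 3 ∨ e = 4 ∨ e = 5 ∨ e = 6 ∨ e = 7 ∨ e = 8 ∨ e = 9 := by
    omega
  rcases h with h | h | h | h | h | h | h | h | h | h <;> subst h <;>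
    exact ⟨by decide, by decide⟩

-- A's loop, started at any accumulator, equals B's check-then-fold over B's digit list.
theorem loop_eq_aux (n : Nat) : ∀ (x num : Int), x.toNat ≤ n →
    whatRevLoopA x num =
      if (digitsB x).any (fun d => (PySem.Dict.get? tableB d).isNone) then -1
      else (digitsB x).foldl (fun m d => 10 * m + PySem.Dict.getD tableB d 0) num := by
  induction n with
  | zero =>
    intro x num hx
    have hnp : ¬ x > 0 := by omega
    rw [whatRevLoopA, digitsB, if_neg hnp, if_neg hnp]
    simp
  | succ n ih =>
    intro x num hx
    by_cases hpos : x > 0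
    · rw [whatRevLoopA, digitsB, if_pos hpos, if_pos hpos]
      have hmd : PySem.Int.mod x 10 = x % 10 :=
        PySem.Int.mod_eq_emod_of_pos (by omega : (0:Int) < 10)
      have hfd : PySem.Int.floordiv x 10 = x / 10 :=
        PySem.Int.floordiv_eq_ediv_of_pos (by omega : (0:Int) < 10)
      have hrec : (PySem.Int.floordiv x 10).toNat ≤ n := by rw [hfd]; omega
      simp only [hmd, hfd]
      obtain ⟨hb, hg⟩ := lookup_spec (x % 10) (by omega) (by omega)
      by_cases hbad : PySem.List.pyGetD revTableA (x % 10) 0 = -1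
      · have hnone : tableB.get? (x % 10) = none := by
          have hb' := hb
          simp [hbad] at hb'
          exact hb'
        rw [if_pos hbad]
        simp [List.any_cons, hnone]
      · have hsome : ¬ tableB.get? (x % 10) = none := by
          intro hcontra
          rw [hcontra] at hb
          simp [hbad] at hb
        have hgd : tableB.getD (x % 10) 0 = PySem.List.pyGetD revTableA (x % 10) 0 := by
          rw [hg, if_neg hbad]
        have hrec' : (x / 10).toNat ≤ n := hfd ▸ hrec
        rw [if_neg hbad, ih (x / 10) _ hrec']
        simp [List.any_cons, List.foldl_cons, hsome, hgd]
    · rw [whatRevLoopA, digitsB, if_neg hpos, if_neg hpos]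
      simp

-- ===== VERDICT (by name: the statement is the Claim_ definition above) =====
theorem what_reverse_spec : Claim_equal_what_reverse := by
  intro x _
  unfold Spec_what_reverse what_reverse what_reverse_alt
  exact loop_eq_aux x.toNat x 0 le_rfl
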